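-- pv_equiv track=rewrite | github.com/sreevarshan-xenoz/xencode | xencode/features/project_analyzer.py | _detect_circular_deps
-- ===== SOURCE A (Python) =====
-- from typing import Dict, List, Optional, Any, Set, Tuple
--
-- def _detect_circular_deps(internal_deps: Dict[str, List[str]]) -> List[List[str]]:
--     """Detect circular dependencies"""
--     circular = []
--
--     def has_path(start: str, end: str, visited: Set[str]) -> bool:
--         if start == end:
--             return True
--         if start in visited:
--             return False
--         visited.add(start)
--         for dep in internal_deps.get(start, []):
--             if has_path(dep, end, visited):
--                 return True
--         return False
--
--     # Check each pair
--     for module in internal_deps: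
--         for dep in internal_deps[module]:
--             if dep in internal_deps and has_path(dep, module, set()):
--                 cycle = [module, dep]
--                 if cycle not in circular and list(reversed(cycle)) not in circular:
--                     circular.append(cycle)
--
--     return circular
-- ===== SOURCE B (Python) =====
-- def _detect_circular_deps(internal_deps):
--     """Detect circular dependencies (reachability closure computed once per module)."""
--     def reach_all(start):
--         visited = set()
--         def go(node):
--             if node in visited:
--                 return
--             visited.add(node)
--             for d in internal_deps.get(node, []):
--                 go(d)
--         go(start)
--         return visited
--
--     closure = {k: reach_all(k) for k in internal_deps}
--     circular = []
--     seen = set()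
--     for module in internal_deps:
--         for dep in internal_deps[module]:
--             if dep in closure and module in closure[dep]:
--                 key = (min(module, dep), max(module, dep))
--                 if key not in seen:
--                     seen.add(key)
--                     circular.append([module, dep])
--     return circular
-- ===== Notes on version B (the rewrite author's own statement) =====
-- stated objective: alternative
-- what changed: A runs an early-exit DFS from scratch for every edge; B computes the full reachability closure once per module (one DFS per key), then detects cyclic edges by set lookups, deduplicating with a seen-set of canonical pairs instead of two list scans.
import Mathlib
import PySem

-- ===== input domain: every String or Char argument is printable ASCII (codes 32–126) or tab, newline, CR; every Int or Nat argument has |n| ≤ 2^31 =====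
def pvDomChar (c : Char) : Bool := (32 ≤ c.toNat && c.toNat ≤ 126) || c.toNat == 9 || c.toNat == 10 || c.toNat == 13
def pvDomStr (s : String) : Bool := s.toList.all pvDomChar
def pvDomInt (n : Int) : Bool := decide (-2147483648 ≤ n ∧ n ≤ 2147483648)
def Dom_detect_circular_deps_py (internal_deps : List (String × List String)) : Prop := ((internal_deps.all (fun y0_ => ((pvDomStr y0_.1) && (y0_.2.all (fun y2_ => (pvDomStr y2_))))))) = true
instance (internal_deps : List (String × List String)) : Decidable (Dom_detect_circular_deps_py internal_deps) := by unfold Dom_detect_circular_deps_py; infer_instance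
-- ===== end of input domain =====

-- B replaces A's early-exit DFS per EDGE by one reachability closure per MODULE, then a linear edge scan with a seen-set of canonical pairs (an alternative algorithm; asymptotically fewer DFS runs, not measured faster here).

-- ===== PORT A =====
-- has_path(start, end, visited): visited is MUTATED in place and shared across the sibling
-- recursive calls, so the port threads the set through and returns (result, visited).
-- Fuel: each non-trivial level adds a node to visited, so any fuel beyond the number of
-- distinct nodes is enough; the caller passes 2 + total number of dependency entries.
def pvHasPath (d : PySem.Dict String (List String)) (endN : String) :
    Nat → String → PySem.Set String → Bool × PySem.Set String
  | 0, _, v => (false, v)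
  | f + 1, start, v =>
    if start = endN then (true, v)
    else if PySem.Set.contains v start then (false, v)
    else
      (d.getD start []).foldl
        (fun acc dep => if acc.1 then acc else pvHasPath d endN f dep acc.2)
        (false, PySem.Set.add v start)

def detect_circular_deps_py (internal_deps : List (String × List String)) : List (List String) :=
  let d := PySem.Dict.ofList internal_deps
  let fuel := 2 + (d.values.map List.length).sum
  d.items.foldl (fun circular mi =>
    mi.2.foldl (fun circular dep =>
      if d.contains dep && (pvHasPath d mi.1 fuel dep PySem.Set.empty).1 then
        if [mi.1, dep] ∈ circular ∨ [dep, mi.1] ∈ circular then circular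
        else circular ++ [[mi.1, dep]]
      else circular) circular) []

-- ===== PORT B =====
-- reach_all(start): the full DFS closure (set of all nodes reachable from start, start included)
def pvReachAll (d : PySem.Dict String (List String)) :
    Nat → String → PySem.Set String → PySem.Set String
  | 0, _, v => v
  | f + 1, node, v =>
    if PySem.Set.contains v node then v
    else (d.getD node []).foldl (fun v dep => pvReachAll d f dep v) (PySem.Set.add v node)

def detect_circular_deps_py_alt (internal_deps : List (String × List String)) : List (List String) :=
  let d := PySem.Dict.ofList internal_deps
  let fuel := 2 + (d.values.map List.length).sum
  let closure := d.items.foldl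
    (fun c mi => c.insert mi.1 (pvReachAll d fuel mi.1 PySem.Set.empty)) PySem.Dict.empty
  (d.items.foldl (fun acc mi =>
    mi.2.foldl (fun acc dep =>
      match closure.get? dep with
      | none => acc
      | some s =>
        if PySem.Set.contains s mi.1 then
          let key := if mi.1 ≤ dep then (mi.1, dep) else (dep, mi.1)
          if PySem.Set.contains acc.2 key then acc
          else (acc.1 ++ [[mi.1, dep]], PySem.Set.add acc.2 key)
        else acc) acc)
    (([] : List (List String)), (PySem.Set.empty : PySem.Set (String × String)))).1

-- ===== PRECONDITION & SPEC =====
def Spec_detect_circular_deps_py (internal_deps : List (String × List String)) (out : List (List String)) : Prop := out = detect_circular_deps_py_alt internal_deps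
instance (internal_deps : List (String × List String)) (out : List (List String)) : Decidable (Spec_detect_circular_deps_py internal_deps out) := by unfold Spec_detect_circular_deps_py; infer_instance

-- ===== CLAIM (what is proved, stated in full; the proofs are below) =====
def Claim_equal_detect_circular_deps_py : Prop := ∀ (internal_deps : List (String × List String)), Dom_detect_circular_deps_py internal_deps → Spec_detect_circular_deps_py internal_deps (detect_circular_deps_py internal_deps)

-- ===== LEMMAS AND PROOFS =====

lemma pvFoldl_subset {α : Type} (g : PySem.Set String → α → PySem.Set String)
    (h : ∀ v x, v ⊆ g v x) : ∀ (ds : List α) (v : PySem.Set String), v ⊆ ds.foldl g v := by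
  intro ds
  induction ds with
  | nil => intro v; simp
  | cons x xs ih => intro v; exact List.Subset.trans (h v x) (ih (g v x))

lemma pvReach_subset (d : PySem.Dict String (List String)) :
    ∀ (f : Nat) (a : String) (v : PySem.Set String), v ⊆ pvReachAll d f a v := by
  intro f
  induction f with
  | zero => intro a v; simp [pvReachAll]
  | succ f ih =>
    intro a v
    simp only [pvReachAll]
    split
    · exact fun _ h => h
    · refine List.Subset.trans ?_ (pvFoldl_subset _ (fun v x => ih x v) _ _)
      intro y hy; simp [PySem.Set.mem_add]; tauto

lemma pvTrueFold (d : PySem.Dict String (List String)) (b : String) (f : Nat) :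
    ∀ (ds : List String) (v : PySem.Set String),
      ds.foldl (fun acc dep => if acc.1 then acc else pvHasPath d b f dep acc.2) (true, v) = (true, v) := by
  intro ds
  induction ds with
  | nil => intro v; rfl
  | cons x xs ih =>
    intro v
    rw [List.foldl_cons]
    exact ih v

lemma pvMain (d : PySem.Dict String (List String)) (b : String) :
    ∀ (f : Nat) (a : String) (v : PySem.Set String), b ∉ v →
      ((pvHasPath d b f a v).1 = true ↔ b ∈ pvReachAll d f a v) ∧
      ((pvHasPath d b f a v).1 = false → (pvHasPath d b f a v).2 = pvReachAll d f a v) := by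
  intro f
  induction f with
  | zero =>
    intro a v hb
    refine ⟨?_, fun _ => rfl⟩
    simp only [pvHasPath, pvReachAll, Bool.false_eq_true, false_iff]
    exact hb
  | succ f ih =>
    intro a v hb
    simp only [pvHasPath, pvReachAll]
    by_cases hab : a = b
    · subst hab
      have hva : PySem.Set.contains v a = false := by
        rw [Bool.eq_false_iff]
        intro h
        simp at h
        exact hb h
      rw [if_pos rfl, hva, if_neg (by simp)]
      refine ⟨?_, fun h => by simp at h⟩
      simp only [true_iff]
      have : a ∈ PySem.Set.add v a := by simp [PySem.Set.mem_add]
      exact pvFoldl_subset _ (fun v x => pvReach_subset d f x v) _ _ this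
    · rw [if_neg hab]
      by_cases hv : PySem.Set.contains v a = true
      · rw [if_pos hv, if_pos hv]
        refine ⟨?_, fun _ => rfl⟩
        simp only [Bool.false_eq_true, false_iff]
        exact hb
      · rw [if_neg hv, if_neg hv]
        have hb' : b ∉ PySem.Set.add v a := by
          rw [PySem.Set.mem_add]
          rintro (h | h)
          · exact hb h
          · exact hab h.symm
        suffices h : ∀ (ds : List String) (w : PySem.Set String), b ∉ w →
            ((ds.foldl (fun acc dep => if acc.1 then acc else pvHasPath d b f dep acc.2) (false, w)).1 = true
              ↔ b ∈ ds.foldl (fun v dep => pvReachAll d f dep v) w) ∧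
            ((ds.foldl (fun acc dep => if acc.1 then acc else pvHasPath d b f dep acc.2) (false, w)).1 = false →
              (ds.foldl (fun acc dep => if acc.1 then acc else pvHasPath d b f dep acc.2) (false, w)).2
                = ds.foldl (fun v dep => pvReachAll d f dep v) w) by
          exact h _ _ hb'
        intro ds
        induction ds with
        | nil =>
          intro w hw
          refine ⟨?_, fun _ => rfl⟩
          simp only [List.foldl_nil, Bool.false_eq_true, false_iff]
          exact hw
        | cons x xs ihds =>
          intro w hw
          rw [List.foldl_cons, List.foldl_cons]
          rcases ih x w hw with ⟨ih1, ih2⟩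
          rcases hpe : pvHasPath d b f x w with ⟨r, w'⟩
          rw [hpe] at ih1 ih2
          rw [show (if ((false, w) : Bool × PySem.Set String).1 = true then ((false, w) : Bool × PySem.Set String) else (r, w')) = (r, w') from rfl]
          cases r with
          | true =>
            rw [pvTrueFold]
            have hbm : b ∈ pvReachAll d f x w := ih1.mp rfl
            refine ⟨?_, fun h => by simp at h⟩
            simp only [true_iff]
            exact pvFoldl_subset _ (fun v x => pvReach_subset d f x v) _ _ hbm
          | false =>
            have hv2 : w' = pvReachAll d f x w := ih2 rfl
            have hbw : b ∉ pvReachAll d f x w := by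
              intro h
              simpa using ih1.mpr h
            subst hv2
            exact ihds _ hbw

lemma pvCanon_eq_iff (x y m dep : String) :
    ((if x ≤ y then (x,y) else (y,x)) = (if m ≤ dep then (m,dep) else (dep,m))) ↔
      ((x = m ∧ y = dep) ∨ (x = dep ∧ y = m)) := by
  split_ifs with h1 h2 h2 <;> simp only [Prod.mk.injEq] <;> constructor
  · rintro ⟨rfl, rfl⟩; exact Or.inl ⟨rfl, rfl⟩
  · rintro (⟨rfl, rfl⟩ | ⟨rfl, rfl⟩)
    · exact ⟨rfl, rfl⟩
    · exact ⟨le_antisymm h1 h2, le_antisymm h2 h1⟩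
  · rintro ⟨rfl, rfl⟩; exact Or.inr ⟨rfl, rfl⟩
  · rintro (⟨rfl, rfl⟩ | ⟨rfl, rfl⟩)
    · exact absurd h1 h2
    · exact ⟨rfl, rfl⟩
  · rintro ⟨rfl, rfl⟩; exact Or.inr ⟨rfl, rfl⟩
  · rintro (⟨rfl, rfl⟩ | ⟨rfl, rfl⟩)
    · exact absurd h2 h1
    · exact ⟨rfl, rfl⟩
  · rintro ⟨rfl, rfl⟩; exact Or.inl ⟨rfl, rfl⟩
  · rintro (⟨rfl, rfl⟩ | ⟨rfl, rfl⟩)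
    · exact ⟨rfl, rfl⟩
    · rcases le_total x y with h | h
      · exact absurd h h1
      · exact absurd h h2

lemma pvClosure_get (d : PySem.Dict String (List String)) (fuel : Nat) (hn : d.keys.Nodup) (k : String) :
    (d.items.foldl (fun c mi => c.insert mi.1 (pvReachAll d fuel mi.1 PySem.Set.empty))
        (PySem.Dict.empty : PySem.Dict String (PySem.Set String))).get? k
      = if d.contains k then some (pvReachAll d fuel k PySem.Set.empty) else none := by
  have hkeys : d.keys = d.items.map Prod.fst := rfl
  have hfresh : ∀ a ∈ d.items, (PySem.Dict.empty : PySem.Dict String (PySem.Set String)).contains a.1 = false := by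
    intro a _; simp [PySem.Dict.contains_empty]
  have hnd : (d.items.map Prod.fst).Nodup := hkeys ▸ hn
  have hitems := PySem.Dict.items_foldl_insert_fresh (l := d.items) (k := Prod.fst)
    (v := fun mi => pvReachAll d fuel mi.1 PySem.Set.empty)
    (d := (PySem.Dict.empty : PySem.Dict String (PySem.Set String))) hfresh hnd
  set c := d.items.foldl (fun c mi => c.insert mi.1 (pvReachAll d fuel mi.1 PySem.Set.empty))
        (PySem.Dict.empty : PySem.Dict String (PySem.Set String)) with hcdef
  have hci : c.items = d.items.map (fun mi => (mi.1, pvReachAll d fuel mi.1 PySem.Set.empty)) := by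
    simpa using hitems
  have hck : c.keys = d.keys := by
    show c.items.map Prod.fst = d.keys
    rw [hci, hkeys, List.map_map]
    rfl
  by_cases h : d.contains k = true
  · rw [if_pos h]
    have hk : k ∈ d.keys := (PySem.Dict.contains_iff_mem_keys _ _).mp h
    rw [hkeys] at hk
    rcases List.mem_map.mp hk with ⟨mi, hmi, hfst⟩
    have hmem : (k, pvReachAll d fuel k PySem.Set.empty) ∈ c.items := by
      rw [hci]
      exact List.mem_map.mpr ⟨mi, hmi, by rw [hfst]⟩
    exact PySem.Dict.get?_of_mem_items _ hmem (hck ▸ hn)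
  · rw [if_neg h]
    have hk : k ∉ c.keys := by
      rw [hck]
      intro hm
      exact h ((PySem.Dict.contains_iff_mem_keys _ _).mpr hm)
    exact (PySem.Dict.get?_eq_none_iff_not_mem_keys _ _).mpr hk


lemma pvInner (d : PySem.Dict String (List String)) (fuel : Nat)
    (closure : PySem.Dict String (PySem.Set String))
    (hc : ∀ k, closure.get? k = if d.contains k then some (pvReachAll d fuel k PySem.Set.empty) else none)
    (m : String) :
    ∀ (ds : List String) (circ : List (List String)) (seen : PySem.Set (String × String)),
      (∀ x y : String, ([x,y] ∈ circ ∨ [y,x] ∈ circ) ↔ (if x ≤ y then (x,y) else (y,x)) ∈ seen) →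
      (ds.foldl (fun acc dep =>
          match closure.get? dep with
          | none => acc
          | some s =>
            if PySem.Set.contains s m then
              if PySem.Set.contains acc.2 (if m ≤ dep then (m, dep) else (dep, m)) then acc
              else (acc.1 ++ [[m, dep]], PySem.Set.add acc.2 (if m ≤ dep then (m, dep) else (dep, m)))
            else acc) (circ, seen)).1
        = ds.foldl (fun circular dep =>
            if d.contains dep && (pvHasPath d m fuel dep PySem.Set.empty).1 then
              if [m, dep] ∈ circular ∨ [dep, m] ∈ circular then circular
              else circular ++ [[m, dep]]
            else circular) circ
      ∧ (∀ x y : String,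
          ([x,y] ∈ ds.foldl (fun circular dep =>
            if d.contains dep && (pvHasPath d m fuel dep PySem.Set.empty).1 then
              if [m, dep] ∈ circular ∨ [dep, m] ∈ circular then circular
              else circular ++ [[m, dep]]
            else circular) circ
           ∨ [y,x] ∈ ds.foldl (fun circular dep =>
            if d.contains dep && (pvHasPath d m fuel dep PySem.Set.empty).1 then
              if [m, dep] ∈ circular ∨ [dep, m] ∈ circular then circular
              else circular ++ [[m, dep]]
            else circular) circ)
          ↔ (if x ≤ y then (x,y) else (y,x)) ∈ (ds.foldl (fun acc dep =>
          match closure.get? dep with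
          | none => acc
          | some s =>
            if PySem.Set.contains s m then
              if PySem.Set.contains acc.2 (if m ≤ dep then (m, dep) else (dep, m)) then acc
              else (acc.1 ++ [[m, dep]], PySem.Set.add acc.2 (if m ≤ dep then (m, dep) else (dep, m)))
            else acc) (circ, seen)).2) := by
  intro ds
  induction ds with
  | nil => intro circ seen hinv; exact ⟨rfl, hinv⟩
  | cons dep ds ihds =>
    intro circ seen hinv
    simp only [List.foldl_cons]
    by_cases hd : d.contains dep = true
    · have hcond : (pvHasPath d m fuel dep PySem.Set.empty).1
          = PySem.Set.contains (pvReachAll d fuel dep PySem.Set.empty) m := by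
        have hm := (pvMain d m fuel dep PySem.Set.empty (by simp [PySem.Set.empty])).1
        cases hp : (pvHasPath d m fuel dep PySem.Set.empty).1
        · rw [hp] at hm
          have hnm : m ∉ pvReachAll d fuel dep PySem.Set.empty := by
            intro h; simpa using hm.mpr h
          symm
          rw [Bool.eq_false_iff]
          intro hh
          exact hnm ((PySem.Set.contains_iff _ _).mp hh)
        · rw [hp] at hm
          symm
          exact (PySem.Set.contains_iff _ _).mpr (hm.mp rfl)
      by_cases hreach : PySem.Set.contains (pvReachAll d fuel dep PySem.Set.empty) m = true
      · by_cases hseen : (if m ≤ dep then (m, dep) else (dep, m)) ∈ seen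
        · have hseenb : PySem.Set.contains seen (if m ≤ dep then (m, dep) else (dep, m)) = true :=
            (PySem.Set.contains_iff _ _).mpr hseen
          have hmemA : ([m, dep] ∈ circ ∨ [dep, m] ∈ circ) := (hinv m dep).mpr hseen
          simp only [hc dep, hd, hcond, hreach, hseenb, if_pos hmemA, Bool.and_self, if_true]
          exact ihds circ seen hinv
        · have hseenb : PySem.Set.contains seen (if m ≤ dep then (m, dep) else (dep, m)) = false := by
            rw [Bool.eq_false_iff]; intro hh; exact hseen ((PySem.Set.contains_iff _ _).mp hh)
          have hmemA : ¬ ([m, dep] ∈ circ ∨ [dep, m] ∈ circ) := fun hh => hseen ((hinv m dep).mp hh)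
          simp only [hc dep, hd, hcond, hreach, hseenb, if_neg hmemA, Bool.and_self, if_true,
            Bool.false_eq_true, if_false]
          refine ihds _ _ ?_
          intro x y
          rw [List.mem_append, List.mem_append, List.mem_singleton, List.mem_singleton,
              PySem.Set.mem_add]
          have hkey : ([x, y] = [m, dep] ∨ [y, x] = [m, dep]) ↔
              (if x ≤ y then (x,y) else (y,x)) = (if m ≤ dep then (m,dep) else (dep,m)) := by
            rw [pvCanon_eq_iff]
            simp only [List.cons.injEq, and_true]
            tauto
          have hxy := hinv x y
          tauto
      · have hreach' : PySem.Set.contains (pvReachAll d fuel dep PySem.Set.empty) m = false := by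
          cases h : PySem.Set.contains (pvReachAll d fuel dep PySem.Set.empty) m
          · rfl
          · exact absurd h hreach
        simp only [hc dep, hd, hcond, hreach', Bool.and_false, Bool.false_eq_true, if_false,
          if_true]
        exact ihds circ seen hinv
    · have hd' : d.contains dep = false := by
        cases h : d.contains dep
        · rfl
        · exact absurd h hd
      simp only [hc dep, hd', Bool.false_and, Bool.false_eq_true, if_false]
      exact ihds circ seen hinv

lemma pvOuter (d : PySem.Dict String (List String)) (fuel : Nat)
    (closure : PySem.Dict String (PySem.Set String))
    (hc : ∀ k, closure.get? k = if d.contains k then some (pvReachAll d fuel k PySem.Set.empty) else none) :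
    ∀ (its : List (String × List String)) (circ : List (List String)) (seen : PySem.Set (String × String)),
      (∀ x y : String, ([x,y] ∈ circ ∨ [y,x] ∈ circ) ↔ (if x ≤ y then (x,y) else (y,x)) ∈ seen) →
      (its.foldl (fun acc mi =>
          mi.2.foldl (fun acc dep =>
            match closure.get? dep with
            | none => acc
            | some s =>
              if PySem.Set.contains s mi.1 then
                if PySem.Set.contains acc.2 (if mi.1 ≤ dep then (mi.1, dep) else (dep, mi.1)) then acc
                else (acc.1 ++ [[mi.1, dep]], PySem.Set.add acc.2 (if mi.1 ≤ dep then (mi.1, dep) else (dep, mi.1)))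
              else acc) acc) (circ, seen)).1
        = its.foldl (fun circular mi =>
            mi.2.foldl (fun circular dep =>
              if d.contains dep && (pvHasPath d mi.1 fuel dep PySem.Set.empty).1 then
                if [mi.1, dep] ∈ circular ∨ [dep, mi.1] ∈ circular then circular
                else circular ++ [[mi.1, dep]]
              else circular) circular) circ := by
  intro its
  induction its with
  | nil => intro circ seen hinv; rfl
  | cons mi its ihits =>
    intro circ seen hinv
    simp only [List.foldl_cons]
    rcases pvInner d fuel closure hc mi.1 mi.2 circ seen hinv with ⟨h1, h2⟩
    rcases hB : mi.2.foldl (fun acc dep =>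
            match closure.get? dep with
            | none => acc
            | some s =>
              if PySem.Set.contains s mi.1 then
                if PySem.Set.contains acc.2 (if mi.1 ≤ dep then (mi.1, dep) else (dep, mi.1)) then acc
                else (acc.1 ++ [[mi.1, dep]], PySem.Set.add acc.2 (if mi.1 ≤ dep then (mi.1, dep) else (dep, mi.1)))
              else acc) (circ, seen) with ⟨circ', seen'⟩
    rw [hB] at h1 h2
    simp only at h1 h2
    rw [← h1] at h2 ⊢
    rw [hB]
    exact ihits circ' seen' h2


-- ===== VERDICT (by name: the statement is the Claim_ definition above) =====
theorem detect_circular_deps_py_spec : Claim_equal_detect_circular_deps_py := by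
  intro internal_deps _
  show detect_circular_deps_py internal_deps = detect_circular_deps_py_alt internal_deps
  simp only [detect_circular_deps_py, detect_circular_deps_py_alt]
  exact (pvOuter (PySem.Dict.ofList internal_deps)
    (2 + ((PySem.Dict.ofList internal_deps).values.map List.length).sum)
    ((PySem.Dict.ofList internal_deps).items.foldl
      (fun c mi => c.insert mi.1 (pvReachAll (PySem.Dict.ofList internal_deps)
        (2 + ((PySem.Dict.ofList internal_deps).values.map List.length).sum) mi.1 PySem.Set.empty))
      PySem.Dict.empty)
    (pvClosure_get (PySem.Dict.ofList internal_deps)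
      (2 + ((PySem.Dict.ofList internal_deps).values.map List.length).sum)
      (PySem.Dict.nodup_keys_ofList internal_deps))
    (PySem.Dict.ofList internal_deps).items [] PySem.Set.empty
    (by intro x y; simp [PySem.Set.empty])).symm
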